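-- pv_equiv track=rewrite | github.com/qclib/qclib | qclib/gates/mcu.py | _compute_qubit_pairs
-- ===== SOURCE A (Python) =====
-- from collections import namedtuple
--
-- def _compute_qubit_pairs(n_qubits_base, step):
--     pairs = namedtuple("pairs", ["control", "target"])
--     if step == 1:
--         start = 0
--         reverse = True
--     else:
--         start = 1
--         reverse = False
--     qubit_pairs = [
--         pairs(control, target)
--         for target in range(n_qubits_base)
--         for control in range(start, target)
--     ]
--     qubit_pairs.sort(key=lambda e: e.control + e.target, reverse=reverse)
--     return qubit_pairs
-- ===== SOURCE B (Python) =====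
-- from collections import namedtuple
--
-- def _compute_qubit_pairs(n_qubits_base, step):
--     pairs = namedtuple("pairs", ["control", "target"])
--     if step == 1:
--         start = 0
--         reverse = True
--     else:
--         start = 1
--         reverse = False
--     # One group per index sum s: walk the anti-diagonal from its middle
--     # outward (control descending, target ascending) — this is exactly the
--     # stable tie order the sort in the original produces.
--     def diagonal(s):
--         group = []
--         control = (s - 1) // 2
--         while control >= start and s - control < n_qubits_base:
--             group.append(pairs(control, s - control))
--             control -= 1
--         return group
--
--     lo = 2 * start + 1
--     hi = 2 * n_qubits_base - 3
--     groups = [diagonal(s) for s in range(lo, hi + 1)]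
--     if reverse:
--         groups.reverse()
--     return [p for g in groups for p in g]
-- ===== Notes on version B (the rewrite author's own statement) =====
-- stated objective: alternative
-- what changed: Instead of materializing all control/target pairs and stable-sorting them by index sum, B emits the pairs directly in the final order: one anti-diagonal group per index sum (walked with control descending so the target ascends, reproducing the stable sort's tie order), groups concatenated ascending or in reversed order when reverse is set.
import Mathlib
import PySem

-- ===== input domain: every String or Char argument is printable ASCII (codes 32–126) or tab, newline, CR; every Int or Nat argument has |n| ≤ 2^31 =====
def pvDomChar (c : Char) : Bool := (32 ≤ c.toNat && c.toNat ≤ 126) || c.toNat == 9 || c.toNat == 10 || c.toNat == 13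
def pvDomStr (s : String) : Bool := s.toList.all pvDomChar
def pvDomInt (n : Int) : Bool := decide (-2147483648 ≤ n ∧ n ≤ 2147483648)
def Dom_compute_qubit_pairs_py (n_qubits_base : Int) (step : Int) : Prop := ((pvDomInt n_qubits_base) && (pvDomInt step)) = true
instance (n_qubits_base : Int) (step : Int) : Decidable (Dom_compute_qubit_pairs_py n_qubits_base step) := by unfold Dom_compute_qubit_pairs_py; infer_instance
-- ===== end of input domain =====

-- B replaces A's build-then-stable-sort by a direct anti-diagonal enumeration
-- (one group of pairs per index sum, concatenated in the sort's order); objective: alternative.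

-- ===== PORT A =====
-- the comprehension [(control, target) for target in range(n) for control in range(start, target)]
def pvBuildPairs (n_qubits_base start : Int) : List (Int × Int) :=
  (PySem.List.pyRange 0 n_qubits_base 1).flatMap (fun target =>
    (PySem.List.pyRange start target 1).map (fun control => (control, target)))

def compute_qubit_pairs_py (n_qubits_base : Int) (step : Int) : List (Int × Int) :=
  if step == 1 then
    PySem.List.sorted (pvBuildPairs n_qubits_base 0) (fun e => e.1 + e.2) true
  else
    PySem.List.sorted (pvBuildPairs n_qubits_base 1) (fun e => e.1 + e.2) false

-- ===== PORT B =====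
-- the while loop of B's `diagonal`: control descending from (s-1)//2, one pair per step
def pvDiagonal (n_qubits_base start s control : Int) : List (Int × Int) :=
  if h : start ≤ control ∧ s - control < n_qubits_base then
    (control, s - control) :: pvDiagonal n_qubits_base start s (control - 1)
  else []
termination_by (control - start + 1).toNat
decreasing_by omega

-- groups = [diagonal(s) for s in range(lo, hi + 1)]
def pvGroups (n_qubits_base start lo hi : Int) : List (List (Int × Int)) :=
  (PySem.List.pyRange lo (hi + 1) 1).map
    (fun s => pvDiagonal n_qubits_base start s (PySem.Int.floordiv (s - 1) 2))

def compute_qubit_pairs_py_alt (n_qubits_base : Int) (step : Int) : List (Int × Int) :=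
  let start : Int := if step == 1 then 0 else 1
  let gs := pvGroups n_qubits_base start (2 * start + 1) (2 * n_qubits_base - 3)
  (if step == 1 then gs.reverse else gs).flatten

-- ===== PRECONDITION & SPEC =====
def Spec_compute_qubit_pairs_py (n_qubits_base : Int) (step : Int) (out : List (Int × Int)) : Prop := out = compute_qubit_pairs_py_alt n_qubits_base step
instance (n_qubits_base : Int) (step : Int) (out : List (Int × Int)) : Decidable (Spec_compute_qubit_pairs_py n_qubits_base step out) := by unfold Spec_compute_qubit_pairs_py; infer_instance

-- ===== CLAIM (what is proved, stated in full; the proofs are below) =====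
def Claim_equal_compute_qubit_pairs_py : Prop := ∀ (n_qubits_base : Int) (step : Int), Dom_compute_qubit_pairs_py n_qubits_base step → Spec_compute_qubit_pairs_py n_qubits_base step (compute_qubit_pairs_py n_qubits_base step)

-- ===== LEMMAS AND PROOFS =====

-- The strict total orders (on the pairs that actually occur: the sum determines
-- the control once the target is known, so the sum key's ties are broken by the
-- target) that characterize the stable sort's output, ascending and descending.
def pvRAsc (a b : Int × Int) : Prop :=
  a.1 + a.2 < b.1 + b.2 ∨ (a.1 + a.2 = b.1 + b.2 ∧ a.2 < b.2)

def pvRDesc (a b : Int × Int) : Prop :=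
  b.1 + b.2 < a.1 + a.2 ∨ (a.1 + a.2 = b.1 + b.2 ∧ a.2 < b.2)

-- insertBy into an r-sorted list, when the comparator agrees with the strict
-- order r against every current member, yields an r-sorted permutation.
lemma pv_insertBy_sorted {α : Type} (before : α → α → Bool) (r : α → α → Prop)
    (htr : ∀ a b c, r a b → r b c → r a c) (x : α) :
    ∀ acc : List α, acc.Pairwise r →
      (∀ a ∈ acc, (before x a = true ↔ r x a) ∧ (r x a ∨ r a x)) →
      (PySem.List.insertBy before x acc).Pairwise r ∧
        (PySem.List.insertBy before x acc).Perm (x :: acc) := by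
  intro acc
  induction acc with
  | nil => intro _ _; simp [PySem.List.insertBy]
  | cons y ys ih =>
    intro hp hc
    rw [show PySem.List.insertBy before x (y :: ys)
        = if before x y then x :: y :: ys else y :: PySem.List.insertBy before x ys from by
      simp [PySem.List.insertBy]]
    rcases List.pairwise_cons.mp hp with ⟨hy, hys⟩
    by_cases hb : before x y = true
    · simp only [hb, if_true]
      refine ⟨List.pairwise_cons.mpr ⟨?_, hp⟩, List.Perm.refl _⟩
      intro z hz
      rcases List.mem_cons.mp hz with rfl | hz
      · exact ((hc z (by simp)).1).mp hb
      · exact htr x y z (((hc y (by simp)).1).mp hb) (hy z hz)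
    · simp only [hb, if_false, Bool.false_eq_true]
      have hyx : r y x := by
        rcases (hc y (by simp)).2 with h | h
        · exact absurd (((hc y (by simp)).1).mpr h) hb
        · exact h
      obtain ⟨ihp, ihperm⟩ := ih hys (fun a ha => hc a (by simp [ha]))
      refine ⟨List.pairwise_cons.mpr ⟨?_, ihp⟩, ?_⟩
      · intro z hz
        rcases List.mem_cons.mp (ihperm.mem_iff.mp hz) with rfl | hz
        · exact hyx
        · exact hy z hz
      · exact (ihperm.cons y).trans (List.Perm.swap x y ys)

-- the insertion-sort loop on such input returns an r-sorted permutation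
lemma pv_foldl_insertBy_sorted {α : Type} (before : α → α → Bool) (r : α → α → Prop)
    (htr : ∀ a b c, r a b → r b c → r a c) :
    ∀ (zs acc : List α), acc.Pairwise r →
      (∀ x ∈ zs, ∀ a ∈ acc, (before x a = true ↔ r x a) ∧ (r x a ∨ r a x)) →
      zs.Pairwise (fun a b => (before b a = true ↔ r b a) ∧ (r b a ∨ r a b)) →
      (zs.foldl (fun acc x => PySem.List.insertBy before x acc) acc).Pairwise r ∧
        (zs.foldl (fun acc x => PySem.List.insertBy before x acc) acc).Perm (acc ++ zs) := by
  intro zs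
  induction zs with
  | nil => intro acc hp _ _; simpa using hp
  | cons x zs ih =>
    intro acc hp hc hz
    rcases List.pairwise_cons.mp hz with ⟨hx, hzs⟩
    obtain ⟨hp', hperm'⟩ := pv_insertBy_sorted before r htr x acc hp (hc x (by simp))
    simp only [List.foldl_cons]
    obtain ⟨rp, rperm⟩ := ih (PySem.List.insertBy before x acc) hp'
      (fun y hy a ha => by
        rcases List.mem_cons.mp (hperm'.mem_iff.mp ha) with rfl | ha
        · exact hx y hy
        · exact hc y (by simp [hy]) a ha)
      hzs
    exact ⟨rp, rperm.trans ((hperm'.append_right zs).trans List.perm_middle.symm)⟩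

lemma pv_pyRange_one_pairwise (a b : Int) :
    (PySem.List.pyRange a b 1).Pairwise (· < ·) := by
  simp only [PySem.List.pyRange]
  norm_num
  refine List.pairwise_map.mpr (List.pairwise_lt_range.imp ?_)
  intro k k' h
  omega

lemma pv_mem_build (n start : Int) (hs : 0 ≤ start) (p : Int × Int) :
    p ∈ pvBuildPairs n start ↔ start ≤ p.1 ∧ p.1 < p.2 ∧ p.2 < n := by
  obtain ⟨c, t⟩ := p
  simp only [pvBuildPairs, List.mem_flatMap, List.mem_map, PySem.List.mem_pyRange_one,
    Prod.mk.injEq]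
  constructor
  · rintro ⟨t', ht', c', hc', rfl, rfl⟩; omega
  · rintro ⟨h1, h2, h3⟩; exact ⟨t, by omega, c, by omega, rfl, rfl⟩

lemma pv_mem_diagonal (n start s c : Int) (p : Int × Int) :
    p ∈ pvDiagonal n start s c ↔
      start ≤ p.1 ∧ p.1 ≤ c ∧ s - p.1 < n ∧ p.2 = s - p.1 := by
  fun_induction pvDiagonal n start s c with
  | case1 c h ih =>
    rw [List.mem_cons, ih, Prod.ext_iff]
    obtain ⟨c', t'⟩ := p
    simp only
    omega
  | case2 c h =>
    simp only [List.not_mem_nil, false_iff]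
    omega

lemma pv_diagonal_pairwise (n start s c : Int) :
    (pvDiagonal n start s c).Pairwise (fun a b => a.2 < b.2) := by
  fun_induction pvDiagonal n start s c with
  | case1 c h ih =>
    refine List.pairwise_cons.mpr ⟨?_, ih⟩
    intro b hb
    have := (pv_mem_diagonal n start s (c - 1) b).mp hb
    simp only
    omega
  | case2 c h => exact List.Pairwise.nil

lemma pv_diagonal_sum (n start s c : Int) (p : Int × Int) (hp : p ∈ pvDiagonal n start s c) :
    p.1 + p.2 = s := by
  have := (pv_mem_diagonal n start s c p).mp hp
  omega

lemma pv_mem_groups (n start : Int) (p : Int × Int) :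
    p ∈ (pvGroups n start (2 * start + 1) (2 * n - 3)).flatten ↔
      start ≤ p.1 ∧ p.1 < p.2 ∧ p.2 < n := by
  obtain ⟨c, t⟩ := p
  simp only [pvGroups, List.mem_flatten, List.mem_map, PySem.List.mem_pyRange_one]
  constructor
  · rintro ⟨l, ⟨s, hs, rfl⟩, hm⟩
    have := (pv_mem_diagonal n start s _ _).mp hm
    have hq : c ≤ PySem.Int.floordiv (s - 1) 2 := this.2.1
    rw [PySem.Int.le_floordiv_iff_mul_le (by norm_num)] at hq
    simp only at this ⊢
    omega
  · rintro ⟨h1, h2, h3⟩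
    refine ⟨_, ⟨c + t, by omega, rfl⟩, (pv_mem_diagonal n start (c + t) _ _).mpr ?_⟩
    have hq : c ≤ PySem.Int.floordiv (c + t - 1) 2 := by
      rw [PySem.Int.le_floordiv_iff_mul_le (by norm_num)]; omega
    exact ⟨h1, hq, by omega, by omega⟩

-- A's generation order: target ascending, then control ascending
lemma pv_build_pairwise (n start : Int) :
    (pvBuildPairs n start).Pairwise (fun a b => a.2 < b.2 ∨ (a.2 = b.2 ∧ a.1 < b.1)) := by
  unfold pvBuildPairs
  rw [List.pairwise_flatMap]
  constructor
  · intro t _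
    rw [List.pairwise_map]
    exact (pv_pyRange_one_pairwise _ _).imp (fun h => Or.inr ⟨rfl, h⟩)
  · refine (pv_pyRange_one_pairwise _ _).imp_of_mem ?_
    intro t t' _ _ h x hx y hy
    rcases List.mem_map.mp hx with ⟨c, _, rfl⟩
    rcases List.mem_map.mp hy with ⟨c', _, rfl⟩
    exact Or.inl h

-- the anti-diagonal concatenation is sorted for the ascending strict order
lemma pv_groups_pairwise_asc (n start : Int) :
    ((pvGroups n start (2 * start + 1) (2 * n - 3)).flatten).Pairwise
      (fun a b => a.1 + a.2 < b.1 + b.2 ∨ (a.1 + a.2 = b.1 + b.2 ∧ a.2 < b.2)) := by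
  rw [List.pairwise_flatten]
  constructor
  · intro l hl
    rcases List.mem_map.mp hl with ⟨s, _, rfl⟩
    refine (pv_diagonal_pairwise _ _ _ _).imp_of_mem ?_
    intro a b ha hb h
    exact Or.inr ⟨by rw [pv_diagonal_sum _ _ _ _ _ ha, pv_diagonal_sum _ _ _ _ _ hb], h⟩
  · unfold pvGroups
    rw [List.pairwise_map]
    refine (pv_pyRange_one_pairwise _ _).imp_of_mem ?_
    intro s s' _ _ h x hx y hy
    exact Or.inl (by
      rw [pv_diagonal_sum _ _ _ _ _ hx, pv_diagonal_sum _ _ _ _ _ hy]; exact h)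

-- … and after reversing the group list, for the descending one
lemma pv_groups_rev_pairwise_desc (n start : Int) :
    (((pvGroups n start (2 * start + 1) (2 * n - 3)).reverse).flatten).Pairwise
      (fun a b => b.1 + b.2 < a.1 + a.2 ∨ (a.1 + a.2 = b.1 + b.2 ∧ a.2 < b.2)) := by
  rw [List.pairwise_flatten]
  constructor
  · intro l hl
    rw [List.mem_reverse] at hl
    rcases List.mem_map.mp hl with ⟨s, _, rfl⟩
    refine (pv_diagonal_pairwise _ _ _ _).imp_of_mem ?_
    intro a b ha hb h
    exact Or.inr ⟨by rw [pv_diagonal_sum _ _ _ _ _ ha, pv_diagonal_sum _ _ _ _ _ hb], h⟩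
  · rw [List.pairwise_reverse]
    unfold pvGroups
    rw [List.pairwise_map]
    refine (pv_pyRange_one_pairwise _ _).imp_of_mem ?_
    intro s s' _ _ h x hx y hy
    exact Or.inl (by
      rw [pv_diagonal_sum _ _ _ _ _ hx, pv_diagonal_sum _ _ _ _ _ hy]; exact h)

lemma pv_build_nodup (n start : Int) : (pvBuildPairs n start).Nodup :=
  (pv_build_pairwise n start).imp (by rintro a b h rfl; omega)

lemma pv_groups_nodup (n start : Int) :
    ((pvGroups n start (2 * start + 1) (2 * n - 3)).flatten).Nodup :=
  (pv_groups_pairwise_asc n start).imp (by rintro a b h rfl; omega)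

lemma pv_groups_perm_build (n start : Int) (hs : 0 ≤ start) :
    ((pvGroups n start (2 * start + 1) (2 * n - 3)).flatten).Perm (pvBuildPairs n start) := by
  refine List.perm_of_nodup_nodup_toFinset_eq (pv_groups_nodup n start) (pv_build_nodup n start) ?_
  ext p
  simp only [List.mem_toFinset, pv_mem_groups, pv_mem_build n start hs]

lemma pv_case_asc (n : Int) :
    PySem.List.sorted (pvBuildPairs n 1) (fun e => e.1 + e.2) false =
      (pvGroups n 1 3 (2 * n - 3)).flatten := by
  rw [show PySem.List.sorted (pvBuildPairs n 1) (fun e => e.1 + e.2) false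
      = PySem.List.sorted (pvBuildPairs n 1) (fun e => e.1 + e.2) from rfl,
    PySem.List.sorted_eq_foldl_insertBy]
  have hfold := pv_foldl_insertBy_sorted
    (before := fun a b => decide (a.1 + a.2 < b.1 + b.2)) (r := pvRAsc)
    (by intro a b c h1 h2; unfold pvRAsc at *; omega)
    (pvBuildPairs n 1) [] (by simp) (by simp)
    ((pv_build_pairwise n 1).imp (by
      intro a b h
      simp only [decide_eq_true_iff, pvRAsc]
      omega))
  obtain ⟨hp, hperm⟩ := hfold
  have hD : ((pvGroups n 1 (2 * 1 + 1) (2 * n - 3)).flatten).Pairwise pvRAsc :=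
    pv_groups_pairwise_asc n 1
  have hpermD := pv_groups_perm_build n 1 (by norm_num)
  norm_num at hD hpermD
  exact List.Perm.eq_of_pairwise (le := pvRAsc)
    (by intro a b _ _ h1 h2; exfalso; unfold pvRAsc at *; omega)
    hp hD ((hperm.trans (by simp)).trans hpermD.symm)

lemma pv_case_desc (n : Int) :
    PySem.List.sorted (pvBuildPairs n 0) (fun e => e.1 + e.2) true =
      ((pvGroups n 0 1 (2 * n - 3)).reverse).flatten := by
  rw [PySem.List.sorted_rev_eq_foldl_insertBy]
  have hfold := pv_foldl_insertBy_sorted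
    (before := fun a b => decide (b.1 + b.2 < a.1 + a.2)) (r := pvRDesc)
    (by intro a b c h1 h2; unfold pvRDesc at *; omega)
    (pvBuildPairs n 0) [] (by simp) (by simp)
    ((pv_build_pairwise n 0).imp (by
      intro a b h
      simp only [decide_eq_true_iff, pvRDesc]
      omega))
  obtain ⟨hp, hperm⟩ := hfold
  have hD : (((pvGroups n 0 (2 * 0 + 1) (2 * n - 3)).reverse).flatten).Pairwise pvRDesc :=
    pv_groups_rev_pairwise_desc n 0
  have hpermD : (((pvGroups n 0 (2 * 0 + 1) (2 * n - 3)).reverse).flatten).Perm (pvBuildPairs n 0) :=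
    ((List.reverse_perm _).flatten).trans (pv_groups_perm_build n 0 (le_refl 0))
  norm_num at hD hpermD
  exact List.Perm.eq_of_pairwise (le := pvRDesc)
    (by intro a b _ _ h1 h2; exfalso; unfold pvRDesc at *; omega)
    hp hD ((hperm.trans (by simp)).trans hpermD.symm)

-- ===== VERDICT (by name: the statement is the Claim_ definition above) =====
theorem compute_qubit_pairs_py_spec : Claim_equal_compute_qubit_pairs_py := by
  intro n step _
  unfold Spec_compute_qubit_pairs_py compute_qubit_pairs_py compute_qubit_pairs_py_alt
  by_cases h : step == 1 <;> simp only [h, if_true, if_false, Bool.false_eq_true]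
  · simpa using pv_case_desc n
  · simpa using pv_case_asc n
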